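-- pv_equiv track=rewrite | github.com/Nashoba1er/dots-and-boxes | dots_and_boxes/affichage.py | clic_robots_battle
-- ===== SOURCE A (Python) =====
-- def clic_robots_battle(screen, coord, num_robot1, num_robot2):
--     """
--     entrée : une coordonée [x, y], deux entiers correspondants aux choix actuels
--     effet : retourne la modification des boutons du menu_robots_battle selectionnés
--     (entre 2 et 10)
--     sortie : (num_robot1, num_robot2) modifiés
--     """
--     ecart = 10
--     for i in range(6):
--         if coord[0] <= 250 + ecart and coord[0] >= 250 - ecart:
--             if coord[1] <= 130 + 75 * i + ecart and coord[1] >= 130 + 75 * i - ecart: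
--                 num_robot1 = i
--         if coord[0] <= 350 + ecart and coord[0] >= 350 - ecart:
--             if coord[1] <= 130 + 75 * i + ecart and coord[1] >= 130 + 75 * i - ecart:
--                 num_robot2 = i
--     return (num_robot1, num_robot2)
-- ===== SOURCE B (Python) =====
-- def clic_robots_battle(screen, coord, num_robot1, num_robot2):
--     """Same hit-test, without scanning the 6 buttons: the only row that can
--     match the click's y is computed directly by rounding (y-130)/75."""
--     x, y = coord[0], coord[1]
--     i = (y - 130 + 37) // 75  # nearest button row
--     if 0 <= i <= 5 and abs(y - (130 + 75 * i)) <= 10: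
--         if abs(x - 250) <= 10:
--             num_robot1 = i
--         if abs(x - 350) <= 10:
--             num_robot2 = i
--     return (num_robot1, num_robot2)
-- ===== Notes on version B (the rewrite author's own statement) =====
-- stated objective: simpler
-- what changed: Replaces the 6-iteration scan over all button rows by a direct computation of the single candidate row index from the click's y coordinate (rounding division), then two band checks.
-- outside the precondition, e.g. on clic_robots_battle(None, [5], 0, 0): A returns (0, 0), B raises IndexError; on clic_robots_battle(None, [], 0, 0): A raises IndexError, B raises IndexError
import Mathlib
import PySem

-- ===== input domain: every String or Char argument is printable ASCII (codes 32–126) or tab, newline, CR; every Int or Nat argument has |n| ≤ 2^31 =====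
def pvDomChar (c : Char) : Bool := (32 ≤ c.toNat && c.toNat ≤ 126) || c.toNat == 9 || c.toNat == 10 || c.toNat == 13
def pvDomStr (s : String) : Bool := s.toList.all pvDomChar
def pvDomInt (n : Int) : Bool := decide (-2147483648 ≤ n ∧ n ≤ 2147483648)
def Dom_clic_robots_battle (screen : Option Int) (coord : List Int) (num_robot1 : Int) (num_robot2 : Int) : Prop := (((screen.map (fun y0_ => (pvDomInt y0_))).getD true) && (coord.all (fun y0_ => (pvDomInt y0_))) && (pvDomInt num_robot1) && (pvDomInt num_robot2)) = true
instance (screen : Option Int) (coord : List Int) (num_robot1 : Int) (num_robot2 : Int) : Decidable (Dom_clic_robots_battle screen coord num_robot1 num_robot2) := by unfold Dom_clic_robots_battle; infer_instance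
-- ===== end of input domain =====

-- B replaces A's scan over the 6 button rows by directly computing the single
-- candidate row index from the click's y coordinate (objective: simpler).


-- ===== PORT A =====
-- coord[0] / coord[1] are ported with PySem.List.pyGetD; exact under Pre_ (both
-- indices in range, so Python never raises there).
def clic_robots_battle (screen : Option Int) (coord : List Int) (num_robot1 : Int) (num_robot2 : Int) : Int × Int :=
  let ecart : Int := 10
  let st := (PySem.List.pyRange 0 6 1).foldl (fun (st : Int × Int) i =>
    let st1 :=
      if PySem.List.pyGetD coord 0 0 ≤ 250 + ecart ∧ PySem.List.pyGetD coord 0 0 ≥ 250 - ecart then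
        if PySem.List.pyGetD coord 1 0 ≤ 130 + 75 * i + ecart ∧ PySem.List.pyGetD coord 1 0 ≥ 130 + 75 * i - ecart then
          (i, st.2)
        else st
      else st
    if PySem.List.pyGetD coord 0 0 ≤ 350 + ecart ∧ PySem.List.pyGetD coord 0 0 ≥ 350 - ecart then
      if PySem.List.pyGetD coord 1 0 ≤ 130 + 75 * i + ecart ∧ PySem.List.pyGetD coord 1 0 ≥ 130 + 75 * i - ecart then
        (st1.1, i)
      else st1
    else st1) (num_robot1, num_robot2)
  st

-- ===== PORT B =====
def clic_robots_battle_alt (screen : Option Int) (coord : List Int) (num_robot1 : Int) (num_robot2 : Int) : Int × Int :=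
  let x := PySem.List.pyGetD coord 0 0
  let y := PySem.List.pyGetD coord 1 0
  let i := PySem.Int.floordiv (y - 130 + 37) 75
  if 0 ≤ i ∧ i ≤ 5 ∧ |y - (130 + 75 * i)| ≤ 10 then
    (if |x - 250| ≤ 10 then i else num_robot1,
     if |x - 350| ≤ 10 then i else num_robot2)
  else (num_robot1, num_robot2)

-- ===== PRECONDITION & SPEC =====
-- Pre_ excludes coordinates with fewer than two components: there A either raises
-- IndexError (empty list, or a one-element list whose x lies in a button column)
-- or accidentally returns the inputs unchanged without ever reading y, while B
-- reads y unconditionally and raises.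
def Pre_clic_robots_battle (screen : Option Int) (coord : List Int) (num_robot1 : Int) (num_robot2 : Int) : Prop := 2 ≤ coord.length
instance (screen : Option Int) (coord : List Int) (num_robot1 : Int) (num_robot2 : Int) : Decidable (Pre_clic_robots_battle screen coord num_robot1 num_robot2) := by unfold Pre_clic_robots_battle; infer_instance
def pvWitness_clic_robots_battle : Option Int × List Int × Int × Int := (none, [255, 207], 0, 0)

def Spec_clic_robots_battle (screen : Option Int) (coord : List Int) (num_robot1 : Int) (num_robot2 : Int) (out : Int × Int) : Prop := out = clic_robots_battle_alt screen coord num_robot1 num_robot2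
instance (screen : Option Int) (coord : List Int) (num_robot1 : Int) (num_robot2 : Int) (out : Int × Int) : Decidable (Spec_clic_robots_battle screen coord num_robot1 num_robot2 out) := by unfold Spec_clic_robots_battle; infer_instance

-- ===== CLAIM (what is proved, stated in full; the proofs are below) =====
def Claim_equal_clic_robots_battle : Prop := ∀ (screen : Option Int) (coord : List Int) (num_robot1 : Int) (num_robot2 : Int), Dom_clic_robots_battle screen coord num_robot1 num_robot2 → Pre_clic_robots_battle screen coord num_robot1 num_robot2 → Spec_clic_robots_battle screen coord num_robot1 num_robot2 (clic_robots_battle screen coord num_robot1 num_robot2)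

-- ===== LEMMAS AND PROOFS =====

-- A's loop body, with the two coordinate reads already resolved to x and y.
def stepA (x y : Int) (st : Int × Int) (i : Int) : Int × Int :=
  let ecart : Int := 10
  let st1 :=
    if x ≤ 250 + ecart ∧ x ≥ 250 - ecart then
      if y ≤ 130 + 75 * i + ecart ∧ y ≥ 130 + 75 * i - ecart then
        (i, st.2)
      else st
    else st
  if x ≤ 350 + ecart ∧ x ≥ 350 - ecart then
    if y ≤ 130 + 75 * i + ecart ∧ y ≥ 130 + 75 * i - ecart then
      (st1.1, i)
    else st1
  else st1

theorem stepA_skip (x y i : Int) (st : Int × Int)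
    (h : ¬(130 + 75 * i - 10 ≤ y ∧ y ≤ 130 + 75 * i + 10)) : stepA x y st i = st := by
  simp only [stepA]
  split_ifs <;> first | rfl | (exfalso; omega)

theorem stepA_hit (x y i : Int) (st : Int × Int)
    (h : 130 + 75 * i - 10 ≤ y ∧ y ≤ 130 + 75 * i + 10) :
    stepA x y st i = (if |x - 250| ≤ 10 then i else st.1, if |x - 350| ≤ 10 then i else st.2) := by
  simp only [stepA, abs_le]
  split_ifs <;> first | rfl | (exfalso; omega)

theorem clic_robots_battle_core (screen : Option Int) (x y : Int) (rest : List Int) (n1 n2 : Int) :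
    clic_robots_battle screen (x :: y :: rest) n1 n2 = clic_robots_battle_alt screen (x :: y :: rest) n1 n2 := by
  have h1 : PySem.List.pyGetD (x :: y :: rest) 0 0 = x := by
    norm_num [PySem.List.pyGetD, PySem.List.pyGet?, PySem.List.pyIdx?,
      show (0:Int) ≤ (rest.length:Int) + 1 from by positivity]
  have h2 : PySem.List.pyGetD (x :: y :: rest) 1 0 = y := by
    norm_num [PySem.List.pyGetD, PySem.List.pyGet?, PySem.List.pyIdx?,
      show (0:Int) ≤ (rest.length:Int) from by positivity]
  have hr : PySem.List.pyRange 0 6 1 = [0, 1, 2, 3, 4, 5] := by decide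
  have hd : PySem.Int.floordiv (y - 130 + 37) 75 = (y - 130 + 37) / 75 :=
    PySem.Int.floordiv_eq_ediv_of_pos (by norm_num)
  rw [show clic_robots_battle screen (x :: y :: rest) n1 n2
        = List.foldl (stepA x y) (n1, n2) [0, 1, 2, 3, 4, 5] from by
      simp only [clic_robots_battle, h1, h2, hr]; rfl]
  simp only [clic_robots_battle_alt, h1, h2, hd]
  by_cases hb0 : 130 + 75 * 0 - 10 ≤ y ∧ y ≤ 130 + 75 * 0 + 10
  · -- the click's y lies in the band of button row 0
    have hq : (y - 130 + 37) / 75 = 0 := by omega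
    simp only [List.foldl_cons, List.foldl_nil]
    rw [stepA_hit x y 0 _ (by omega)]
    rw [stepA_skip x y 1 _ (by omega)]
    rw [stepA_skip x y 2 _ (by omega)]
    rw [stepA_skip x y 3 _ (by omega)]
    rw [stepA_skip x y 4 _ (by omega)]
    rw [stepA_skip x y 5 _ (by omega)]
    rw [hq]
    have hc : (0:Int) ≤ (0:Int) ∧ (0:Int) ≤ 5 ∧ |y - (130 + 75 * (0:Int))| ≤ 10 := by
      simp only [abs_le]; omega
    rw [if_pos hc]
  by_cases hb1 : 130 + 75 * 1 - 10 ≤ y ∧ y ≤ 130 + 75 * 1 + 10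
  · -- the click's y lies in the band of button row 1
    have hq : (y - 130 + 37) / 75 = 1 := by omega
    simp only [List.foldl_cons, List.foldl_nil]
    rw [stepA_skip x y 0 _ (by omega)]
    rw [stepA_hit x y 1 _ (by omega)]
    rw [stepA_skip x y 2 _ (by omega)]
    rw [stepA_skip x y 3 _ (by omega)]
    rw [stepA_skip x y 4 _ (by omega)]
    rw [stepA_skip x y 5 _ (by omega)]
    rw [hq]
    have hc : (0:Int) ≤ (1:Int) ∧ (1:Int) ≤ 5 ∧ |y - (130 + 75 * (1:Int))| ≤ 10 := by
      simp only [abs_le]; omega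
    rw [if_pos hc]
  by_cases hb2 : 130 + 75 * 2 - 10 ≤ y ∧ y ≤ 130 + 75 * 2 + 10
  · -- the click's y lies in the band of button row 2
    have hq : (y - 130 + 37) / 75 = 2 := by omega
    simp only [List.foldl_cons, List.foldl_nil]
    rw [stepA_skip x y 0 _ (by omega)]
    rw [stepA_skip x y 1 _ (by omega)]
    rw [stepA_hit x y 2 _ (by omega)]
    rw [stepA_skip x y 3 _ (by omega)]
    rw [stepA_skip x y 4 _ (by omega)]
    rw [stepA_skip x y 5 _ (by omega)]
    rw [hq]
    have hc : (0:Int) ≤ (2:Int) ∧ (2:Int) ≤ 5 ∧ |y - (130 + 75 * (2:Int))| ≤ 10 := by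
      simp only [abs_le]; omega
    rw [if_pos hc]
  by_cases hb3 : 130 + 75 * 3 - 10 ≤ y ∧ y ≤ 130 + 75 * 3 + 10
  · -- the click's y lies in the band of button row 3
    have hq : (y - 130 + 37) / 75 = 3 := by omega
    simp only [List.foldl_cons, List.foldl_nil]
    rw [stepA_skip x y 0 _ (by omega)]
    rw [stepA_skip x y 1 _ (by omega)]
    rw [stepA_skip x y 2 _ (by omega)]
    rw [stepA_hit x y 3 _ (by omega)]
    rw [stepA_skip x y 4 _ (by omega)]
    rw [stepA_skip x y 5 _ (by omega)]
    rw [hq]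
    have hc : (0:Int) ≤ (3:Int) ∧ (3:Int) ≤ 5 ∧ |y - (130 + 75 * (3:Int))| ≤ 10 := by
      simp only [abs_le]; omega
    rw [if_pos hc]
  by_cases hb4 : 130 + 75 * 4 - 10 ≤ y ∧ y ≤ 130 + 75 * 4 + 10
  · -- the click's y lies in the band of button row 4
    have hq : (y - 130 + 37) / 75 = 4 := by omega
    simp only [List.foldl_cons, List.foldl_nil]
    rw [stepA_skip x y 0 _ (by omega)]
    rw [stepA_skip x y 1 _ (by omega)]
    rw [stepA_skip x y 2 _ (by omega)]
    rw [stepA_skip x y 3 _ (by omega)]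
    rw [stepA_hit x y 4 _ (by omega)]
    rw [stepA_skip x y 5 _ (by omega)]
    rw [hq]
    have hc : (0:Int) ≤ (4:Int) ∧ (4:Int) ≤ 5 ∧ |y - (130 + 75 * (4:Int))| ≤ 10 := by
      simp only [abs_le]; omega
    rw [if_pos hc]
  by_cases hb5 : 130 + 75 * 5 - 10 ≤ y ∧ y ≤ 130 + 75 * 5 + 10
  · -- the click's y lies in the band of button row 5
    have hq : (y - 130 + 37) / 75 = 5 := by omega
    simp only [List.foldl_cons, List.foldl_nil]
    rw [stepA_skip x y 0 _ (by omega)]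
    rw [stepA_skip x y 1 _ (by omega)]
    rw [stepA_skip x y 2 _ (by omega)]
    rw [stepA_skip x y 3 _ (by omega)]
    rw [stepA_skip x y 4 _ (by omega)]
    rw [stepA_hit x y 5 _ (by omega)]
    rw [hq]
    have hc : (0:Int) ≤ (5:Int) ∧ (5:Int) ≤ 5 ∧ |y - (130 + 75 * (5:Int))| ≤ 10 := by
      simp only [abs_le]; omega
    rw [if_pos hc]
  · -- the click's y lies in no button row band: both sides leave the inputs unchanged
    simp only [List.foldl_cons, List.foldl_nil]
    rw [stepA_skip x y 0 _ (by omega)]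
    rw [stepA_skip x y 1 _ (by omega)]
    rw [stepA_skip x y 2 _ (by omega)]
    rw [stepA_skip x y 3 _ (by omega)]
    rw [stepA_skip x y 4 _ (by omega)]
    rw [stepA_skip x y 5 _ (by omega)]
    have hc : ¬((0:Int) ≤ (y - 130 + 37) / 75 ∧ (y - 130 + 37) / 75 ≤ 5 ∧
        |y - (130 + 75 * ((y - 130 + 37) / 75))| ≤ 10) := by
      simp only [abs_le]; omega
    rw [if_neg hc]

-- ===== VERDICT (by name: the statement is the Claim_ definition above) =====
theorem clic_robots_battle_spec : Claim_equal_clic_robots_battle := by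
  intro screen coord n1 n2 _ hpre
  unfold Spec_clic_robots_battle
  match coord, hpre with
  | x :: y :: rest, _ => exact clic_robots_battle_core screen x y rest n1 n2
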